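-- pv_equiv track=rewrite | github.com/CC2Vec/CC2Vec | preprocessing_jit/split_train_test.py | clean_and_reformat_code
-- ===== SOURCE A (Python) =====
-- def clean_and_reformat_code(data):
--     # remove empty lines in code
--     # divide code to two part: added_code and removed_code
--     new_diff_added_code, new_diff_removed_code = list(), list()
--     for diff in data:
--         files = list()
--         for file in diff:
--             lines = file['added_code']
--             new_lines = list()
--             for line in lines:
--                 if len(line.strip()) > 0:
--                     new_lines.append(line)
--             files.append(new_lines)
--         new_diff_added_code.append(files)
--     for diff in data:
--         files = list()
--         for file in diff:
--             lines = file['removed_code']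
--             new_lines = list()
--             for line in lines:
--                 if len(line.strip()) > 0:
--                     new_lines.append(line)
--             files.append(new_lines)
--         new_diff_removed_code.append(files)
--     return (new_diff_added_code, new_diff_removed_code)
-- ===== SOURCE B (Python) =====
-- def clean_and_reformat_code(data):
--     # Flatten-then-regroup: collect each file's filtered added/removed lines into
--     # two FLAT lists (one entry per file across all diffs) plus a shape vector of
--     # per-diff file counts, then reslice the flat lists into per-diff chunks.
--     shape = [len(diff) for diff in data]
--     flat_added, flat_removed = [], []
--     for diff in data:
--         for file in diff:
--             flat_added.append([line for line in file['added_code'] if len(line.strip()) > 0])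
--             flat_removed.append([line for line in file['removed_code'] if len(line.strip()) > 0])
--     added, removed, i = [], [], 0
--     for n in shape:
--         added.append(flat_added[i:i + n])
--         removed.append(flat_removed[i:i + n])
--         i += n
--     return (added, removed)
-- ===== Notes on version B (the rewrite author's own statement) =====
-- stated objective: alternative
-- what changed: Instead of A's two separate nested traversals, B flattens all files' filtered line lists into two flat lists plus a shape vector of per-diff file counts, then reconstructs the nested structure by slicing the flat lists with a running offset.
import Mathlib
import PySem

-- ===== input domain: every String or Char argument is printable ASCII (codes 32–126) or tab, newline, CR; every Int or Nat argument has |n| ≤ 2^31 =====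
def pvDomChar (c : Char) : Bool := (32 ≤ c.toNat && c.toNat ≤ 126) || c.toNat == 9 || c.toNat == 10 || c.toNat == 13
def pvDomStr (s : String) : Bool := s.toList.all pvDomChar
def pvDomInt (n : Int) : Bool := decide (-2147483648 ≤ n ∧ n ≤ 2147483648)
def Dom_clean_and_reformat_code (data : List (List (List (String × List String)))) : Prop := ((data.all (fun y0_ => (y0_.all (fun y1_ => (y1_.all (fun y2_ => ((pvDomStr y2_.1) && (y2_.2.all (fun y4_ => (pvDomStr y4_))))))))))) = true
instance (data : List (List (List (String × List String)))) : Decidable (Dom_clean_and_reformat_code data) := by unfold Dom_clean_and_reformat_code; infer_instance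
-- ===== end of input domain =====

-- B replaces A's two nested traversals by flatten-then-regroup: two flat per-file lists plus a
-- shape vector, resliced into per-diff chunks (alternative decomposition, same cost).

-- shared line filter: `len(line.strip()) > 0`
def pvKeep (line : String) : Bool := decide (0 < PySem.Str.len (PySem.Str.strip line))

-- ===== PORT A =====
-- A's two sequential passes; `file['k']` = first-match dict lookup (Pre_ guarantees the key exists, getD default never used)
def clean_and_reformat_code (data : List (List (List (String × List String)))) : List (List (List String)) × List (List (List String)) :=
  let new_diff_added_code :=
    data.foldl (fun acc diff =>
      let files := diff.foldl (fun fs file =>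
        let lines := (PySem.Dict.mk file).getD "added_code" []
        let new_lines := lines.foldl (fun nl line => if pvKeep line then nl ++ [line] else nl) []
        fs ++ [new_lines]) []
      acc ++ [files]) []
  let new_diff_removed_code :=
    data.foldl (fun acc diff =>
      let files := diff.foldl (fun fs file =>
        let lines := (PySem.Dict.mk file).getD "removed_code" []
        let new_lines := lines.foldl (fun nl line => if pvKeep line then nl ++ [line] else nl) []
        fs ++ [new_lines]) []
      acc ++ [files]) []
  (new_diff_added_code, new_diff_removed_code)

-- ===== PORT B =====
-- flatten pass (flat_added, flat_removed), then the regroup loop over `shape` with running offset i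
def clean_and_reformat_code_alt (data : List (List (List (String × List String)))) : List (List (List String)) × List (List (List String)) :=
  let shape := data.map (fun diff => (diff.length : Int))
  let flat := data.foldl (fun fp diff =>
    diff.foldl (fun fp2 file =>
      (fp2.1 ++ [((PySem.Dict.mk file).getD "added_code" []).filter pvKeep],
       fp2.2 ++ [((PySem.Dict.mk file).getD "removed_code" []).filter pvKeep])) fp) ([], [])
  let g := shape.foldl (fun st n =>
      (st.1 ++ [PySem.List.slice flat.1 (some st.2.2) (some (st.2.2 + n))],
       st.2.1 ++ [PySem.List.slice flat.2 (some st.2.2) (some (st.2.2 + n))],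
       st.2.2 + n))
    (([] : List (List (List String))), ([] : List (List (List String))), (0 : Int))
  (g.1, g.2.1)

-- ===== PRECONDITION & SPEC =====
-- Pre_ excludes exactly the inputs where Python A raises KeyError: some file dict lacks 'added_code' or 'removed_code'.
def Pre_clean_and_reformat_code (data : List (List (List (String × List String)))) : Prop :=
  (data.all (fun diff => diff.all (fun file =>
    (PySem.Dict.mk file).contains "added_code" && (PySem.Dict.mk file).contains "removed_code"))) = true
instance (data : List (List (List (String × List String)))) : Decidable (Pre_clean_and_reformat_code data) := by unfold Pre_clean_and_reformat_code; infer_instance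

def pvWitness_clean_and_reformat_code : (List (List (List (String × List String)))) :=
  [[[("added_code", ["a", " "]), ("removed_code", ["x"])]], []]

def Spec_clean_and_reformat_code (data : List (List (List (String × List String)))) (out : List (List (List String)) × List (List (List String))) : Prop := out = clean_and_reformat_code_alt data
instance (data : List (List (List (String × List String)))) (out : List (List (List String)) × List (List (List String))) : Decidable (Spec_clean_and_reformat_code data out) := by unfold Spec_clean_and_reformat_code; infer_instance

-- ===== CLAIM =====
def Claim_equal_clean_and_reformat_code : Prop := ∀ (data : List (List (List (String × List String)))), Dom_clean_and_reformat_code data → Pre_clean_and_reformat_code data → Spec_clean_and_reformat_code data (clean_and_reformat_code data)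

-- ===== LEMMAS AND PROOFS =====

-- a foldl maintaining a pair of append-accumulators is a pair of maps
theorem pv_foldl_pair {α β γ : Type} (l : List α) (f : α → β) (g : α → γ)
    (a : List β) (b : List γ) :
    l.foldl (fun acc x => (acc.1 ++ [f x], acc.2 ++ [g x])) (a, b) = (a ++ l.map f, b ++ l.map g) := by
  induction l generalizing a b with
  | nil => simp
  | cons x xs ih => simp [List.foldl_cons, ih]

-- B's flatten pass is a pair of flatMaps
theorem pv_flat_pair {α β γ : Type} (data : List (List α)) (f : α → β) (g : α → γ)
    (a : List β) (b : List γ) :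
    data.foldl (fun fp diff => diff.foldl (fun fp2 x => (fp2.1 ++ [f x], fp2.2 ++ [g x])) fp) (a, b)
      = (a ++ data.flatMap (fun d => d.map f), b ++ data.flatMap (fun d => d.map g)) := by
  induction data generalizing a b with
  | nil => simp
  | cons d rest ih => simp [List.foldl_cons, pv_foldl_pair, ih]

-- B's regroup loop recovers the nested maps from the flat lists and the shape vector
theorem pv_regroup {α γ : Type} (f g : α → γ) (data : List (List α))
    (preA preB : List γ) (accA accB : List (List γ)) (FA FB : List γ)
    (hA : FA = preA ++ data.flatMap (fun d => d.map f))
    (hB : FB = preB ++ data.flatMap (fun d => d.map g))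
    (hlen : preB.length = preA.length) :
    (data.map (fun d => (d.length : Int))).foldl
      (fun st n => (st.1 ++ [PySem.List.slice FA (some st.2.2) (some (st.2.2 + n))],
                    st.2.1 ++ [PySem.List.slice FB (some st.2.2) (some (st.2.2 + n))],
                    st.2.2 + n))
      (accA, accB, (preA.length : Int))
      = (accA ++ data.map (fun d => d.map f), accB ++ data.map (fun d => d.map g),
         (preA.length : Int) + ((data.map (fun d => (d.length : Int))).sum)) := by
  induction data generalizing preA preB accA accB with
  | nil => simp [hA, hB]
  | cons d rest ih =>
    have hcast : ((preA.length : Int) + (d.length : Int)) = (((preA.length + d.length : Nat)) : Int) := by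
      push_cast; ring
    have hsA : PySem.List.slice FA (some (preA.length : Int)) (some ((preA.length : Int) + (d.length : Int)))
        = d.map f := by
      rw [PySem.List.slice_natCast_add, hA]
      simp [List.flatMap_cons, List.take_left']
    have hsB : PySem.List.slice FB (some (preA.length : Int)) (some ((preA.length : Int) + (d.length : Int)))
        = d.map g := by
      rw [← hlen, PySem.List.slice_natCast_add, hB]
      simp [List.flatMap_cons, List.take_left']
    simp only [List.map_cons, List.foldl_cons, hsA, hsB]
    have := ih (preA ++ d.map f) (preB ++ d.map g) (accA ++ [d.map f]) (accB ++ [d.map g])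
      (by simpa [List.append_assoc] using hA) (by simpa [List.append_assoc] using hB)
      (by simp [hlen])
    simp only [List.length_append, List.length_map] at this
    rw [hcast, this]
    simp only [List.sum_cons, List.append_assoc, List.singleton_append]
    congr 2
    push_cast; ring

-- A's one pass (for either key) in map form
theorem pv_map_form (data : List (List (List (String × List String)))) (k : String) :
    data.foldl (fun acc diff =>
      acc ++ [diff.foldl (fun fs file =>
        fs ++ [((PySem.Dict.mk file).getD k []).foldl (fun nl line => if pvKeep line then nl ++ [line] else nl) []]) []]) []
    = data.map (fun diff => diff.map (fun file => ((PySem.Dict.mk file).getD k []).filter pvKeep)) := by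
  simp only [PySem.List.foldl_append_if_eq_filter, List.nil_append,
    PySem.List.foldl_append_singleton_eq_map]

-- ===== VERDICT =====
theorem clean_and_reformat_code_spec : Claim_equal_clean_and_reformat_code := by
  intro data _ _
  unfold Spec_clean_and_reformat_code clean_and_reformat_code clean_and_reformat_code_alt
  simp only [pv_map_form]
  rw [pv_flat_pair]
  have h := pv_regroup (fun file => ((PySem.Dict.mk file).getD "added_code" []).filter pvKeep)
    (fun file => ((PySem.Dict.mk file).getD "removed_code" []).filter pvKeep)
    data [] [] [] [] _ _ rfl rfl rfl
  simp only [List.length_nil, Nat.cast_zero, List.nil_append] at h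
  simp [h]
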